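-- pv_equiv track=rewrite | github.com/GRIBok11/vov | 01.2.BasicTypes/tasks/filter_list_by_list/filter_list_by_list.py | filter_list_by_list
-- ===== SOURCE A (Python) =====
-- def filter_list_by_list(lst_a: list[int] | range, lst_b: list[int] | range) -> list[int]:
--     """
--     Filter first sorted list by other sorted list
--     :param lst_a: first sorted list
--     :param lst_b: second sorted list
--     :return: filtered sorted list
--     """
--
--     ans = []
--     i, j = 0, 0
--
--     while i < len(lst_a):
--         if j >= len(lst_b) or lst_a[i] < lst_b[j]:
--             ans.append(lst_a[i])
--             i += 1
--         elif lst_a[i] == lst_b[j]: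
--             tmp_a = lst_a[i]
--             while lst_a[i] == tmp_a:
--                 i += 1
--                 if i >= len(lst_a):
--                     return ans
--             j += 1
--         else:
--             j += 1
--
--     return ans
-- ===== SOURCE B (Python) =====
-- def filter_list_by_list(lst_a, lst_b):
--     """
--     Filter first sorted list by other sorted list
--     :param lst_a: first sorted list
--     :param lst_b: second sorted list
--     :return: filtered sorted list
--     """
--     out = []
--     xs, ys = list(lst_a), list(lst_b)
--     while xs:
--         if not ys:
--             out.extend(xs)
--             break
--         x, y = xs[0], ys[0]
--         if y < x:
--             ys = ys[1:]
--         elif y == x: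
--             while xs and xs[0] == x:
--                 xs = xs[1:]
--             ys = ys[1:]
--         else:
--             out.append(x)
--             xs = xs[1:]
--     return out
-- ===== Notes on version B (the rewrite author's own statement) =====
-- stated objective: simpler
-- what changed: A's index-and-pointer merge is recast as iteration on the remaining list suffixes: the index arithmetic, the bounds checks and the early 'return ans' inside the run-skipping inner loop all disappear (the run-skip is a plain dropWhile and loop exit covers A's early return), with the same return value on every input.
import Mathlib
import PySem

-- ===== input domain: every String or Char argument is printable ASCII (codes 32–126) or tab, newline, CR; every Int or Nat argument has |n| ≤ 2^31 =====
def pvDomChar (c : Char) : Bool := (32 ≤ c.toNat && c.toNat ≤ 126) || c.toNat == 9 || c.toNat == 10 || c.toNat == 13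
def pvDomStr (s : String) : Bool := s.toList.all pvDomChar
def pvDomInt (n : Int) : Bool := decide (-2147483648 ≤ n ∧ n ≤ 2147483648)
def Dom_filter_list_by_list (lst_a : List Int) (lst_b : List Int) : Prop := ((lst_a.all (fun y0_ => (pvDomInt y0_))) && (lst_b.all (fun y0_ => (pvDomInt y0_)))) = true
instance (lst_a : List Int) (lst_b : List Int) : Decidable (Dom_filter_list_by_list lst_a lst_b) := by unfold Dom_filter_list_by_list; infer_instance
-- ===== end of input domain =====

-- B recasts A's index-and-pointer merge as iteration on the remaining list suffixes:
-- the index arithmetic, bounds checks and the early 'return ans' inside the run-skip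
-- disappear (simpler); same return value on every input.


-- ===== PORT A =====
-- the inner 'while lst_a[i] == tmp_a' loop: none where the Python does 'return ans'
-- (the run of equal values reached the end of lst_a), else the index after the run.
-- Indices are always in range where accessed, so lst_a[i] is getD i 0.
def pvInnerA (a : List Int) (tmp : Int) (i : Nat) : Option Nat :=
  if a.getD i 0 = tmp then
    if a.length ≤ i + 1 then none
    else pvInnerA a tmp (i + 1)
  else some i
termination_by a.length - i
decreasing_by omega

-- cited by pvOuterA's decreasing_by

-- cited by pvOuterA's decreasing_by
theorem pvInnerA_le (a : List Int) (tmp : Int) :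
    ∀ i i2, pvInnerA a tmp i = some i2 → i ≤ i2 := by
  intro i
  fun_induction pvInnerA a tmp i with
  | case1 i h1 h2 => intro i2 h; simp_all
  | case2 i h1 h2 ih => intro i2 h; have := ih i2 h; omega
  | case3 i h1 => intro i2 h; simp_all

-- the outer 'while i < len(lst_a)' loop over the state (i, j, ans)

-- the outer 'while i < len(lst_a)' loop over the state (i, j, ans)
def pvOuterA (a b : List Int) (i j : Nat) (ans : List Int) : List Int :=
  if i < a.length then
    if b.length ≤ j ∨ a.getD i 0 < b.getD j 0 then
      pvOuterA a b (i + 1) j (ans ++ [a.getD i 0])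
    else if a.getD i 0 = b.getD j 0 then
      match h : pvInnerA a (a.getD i 0) i with
      | none => ans
      | some i2 => pvOuterA a b i2 (j + 1) ans
    else
      pvOuterA a b i (j + 1) ans
  else ans
termination_by (a.length - i) + (b.length - j)
decreasing_by
  · omega
  · have := pvInnerA_le a (a.getD i 0) i i2 h; omega
  · omega

def filter_list_by_list (lst_a : List Int) (lst_b : List Int) : List Int :=
  pvOuterA lst_a lst_b 0 0 []

-- ===== PORT B =====
-- B's 'while xs' loop over the state (xs, ys, out); the inner
-- 'while xs and xs[0] == x: xs = xs[1:]' is dropWhile on xs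
def pvGoB (xs ys out : List Int) : List Int :=
  match xs with
  | [] => out
  | x :: xs' =>
    match ys with
    | [] => out ++ xs
    | y :: ys' =>
      if y < x then pvGoB (x :: xs') ys' out
      else if y = x then pvGoB ((x :: xs').dropWhile (fun z => z == x)) ys' out
      else pvGoB xs' (y :: ys') (out ++ [x])
termination_by xs.length + ys.length
decreasing_by
  · simp only [List.length_cons]
    omega
  · have := List.length_dropWhile_le (fun z => z == x) (x :: xs')
    simp only [List.length_cons] at this ⊢
    omega
  · simp only [List.length_cons]
    omega

def filter_list_by_list_alt (lst_a : List Int) (lst_b : List Int) : List Int :=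
  pvGoB lst_a lst_b []

-- ===== PRECONDITION & SPEC =====
def Spec_filter_list_by_list (lst_a : List Int) (lst_b : List Int) (out : List Int) : Prop :=
  out = filter_list_by_list_alt lst_a lst_b
instance (lst_a : List Int) (lst_b : List Int) (out : List Int) : Decidable (Spec_filter_list_by_list lst_a lst_b out) := by unfold Spec_filter_list_by_list; infer_instance

-- ===== CLAIM (what is proved, stated in full; the proofs are below) =====
def Claim_equal_filter_list_by_list : Prop := ∀ (lst_a : List Int) (lst_b : List Int), Dom_filter_list_by_list lst_a lst_b → Spec_filter_list_by_list lst_a lst_b (filter_list_by_list lst_a lst_b)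

-- ===== LEMMAS AND PROOFS =====

-- the inner loop drops exactly the leading run of tmp from a.drop i
theorem pvInnerA_char (a : List Int) (tmp : Int) :
    ∀ i, i < a.length →
      (pvInnerA a tmp i = none → (a.drop i).dropWhile (fun z => z == tmp) = []) ∧
      (∀ i2, pvInnerA a tmp i = some i2 →
        i2 ≤ a.length ∧ a.getD i2 0 ≠ tmp ∧
        (a.drop i).dropWhile (fun z => z == tmp) = a.drop i2) := by
  intro i
  fun_induction pvInnerA a tmp i with
  | case1 i h1 h2 =>
    intro hi
    have hd : a.drop i = a[i] :: a.drop (i+1) := List.drop_eq_getElem_cons hi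
    have hx : a[i] = tmp := (List.getElem_eq_getD 0).trans h1
    constructor
    · intro _
      rw [hd, List.dropWhile_cons]
      simp [hx, List.drop_eq_nil_of_le (by omega : a.length ≤ i+1)]
    · intro i2 h; simp at h
  | case2 i h1 h2 ih =>
    intro hi
    have hi1 : i + 1 < a.length := by omega
    have hd : a.drop i = a[i] :: a.drop (i+1) := List.drop_eq_getElem_cons hi
    have hx : a[i] = tmp := (List.getElem_eq_getD 0).trans h1
    have hrw : (a.drop i).dropWhile (fun z => z == tmp)
        = (a.drop (i+1)).dropWhile (fun z => z == tmp) := by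
      rw [hd, List.dropWhile_cons]; simp [hx]
    obtain ⟨hn, hs⟩ := ih hi1
    refine ⟨fun h => by rw [hrw]; exact hn h, fun i2 h => ?_⟩
    obtain ⟨hA, hB, hC⟩ := hs i2 h
    exact ⟨hA, hB, by rw [hrw]; exact hC⟩
  | case3 i h1 =>
    intro hi
    have hd : a.drop i = a[i] :: a.drop (i+1) := List.drop_eq_getElem_cons hi
    have hx : a[i] ≠ tmp := fun he => h1 (((List.getElem_eq_getD 0).symm.trans he))
    constructor
    · intro h; simp at h
    · intro i2 h
      simp only [Option.some.injEq] at h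
      subst h
      refine ⟨by omega, h1, ?_⟩
      rw [hd, List.dropWhile_cons]; simp [hx, ← hd]

-- a filter that rejects tmp ignores a leading run of tmp

-- with ys exhausted, B copies the rest of xs
theorem pvGoB_nil_right (xs out : List Int) : pvGoB xs [] out = out ++ xs := by
  cases xs with
  | nil => rw [pvGoB]; simp
  | cons x xs' => rw [pvGoB]

-- the two loops agree: A's state (i, j, ans) corresponds to B's state (a.drop i, b.drop j, ans)
theorem pvOuterA_eq_pvGoB (a b : List Int) :
    ∀ n i j ans, (a.length - i) + (b.length - j) ≤ n →
      pvOuterA a b i j ans = pvGoB (a.drop i) (b.drop j) ans := by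
  intro n
  induction n with
  | zero =>
    intro i j ans hfuel
    rw [pvOuterA, if_neg (by omega), List.drop_eq_nil_of_le (by omega : a.length ≤ i)]
    rw [pvGoB]
  | succ n ih =>
    intro i j ans hfuel
    by_cases hi : i < a.length
    · have hxg : a.getD i 0 = a[i] := (List.getElem_eq_getD 0).symm
      have hd : a.drop i = a.getD i 0 :: a.drop (i+1) := by
        rw [hxg]; exact List.drop_eq_getElem_cons hi
      rw [pvOuterA, if_pos hi]
      by_cases hj : j < b.length
      · have hbg : b.getD j 0 = b[j] := (List.getElem_eq_getD 0).symm
        have hbd : b.drop j = b.getD j 0 :: b.drop (j+1) := by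
          rw [hbg]; exact List.drop_eq_getElem_cons hj
        by_cases hlt : a.getD i 0 < b.getD j 0
        · -- A appends a[i]; on B's side y > x, the final branch
          rw [if_pos (Or.inr hlt), ih (i+1) j (ans ++ [a.getD i 0]) (by omega)]
          rw [hd, hbd, pvGoB, if_neg (by omega), if_neg (by omega)]
        · rw [if_neg (by omega)]
          by_cases he : a.getD i 0 = b.getD j 0
          · -- the matched-value branch: A's inner loop = B's dropWhile
            rw [if_pos he]
            have hchar := pvInnerA_char a (a.getD i 0) i hi
            rcases hI : pvInnerA a (a.getD i 0) i with _ | i2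
            · show ans = pvGoB (a.drop i) (b.drop j) ans
              rw [hd, hbd, pvGoB, if_neg (by omega), if_pos he.symm, ← hd, hchar.1 hI, pvGoB]
            · obtain ⟨hi2len, _, hdw⟩ := hchar.2 i2 hI
              have hii2 : i ≤ i2 := pvInnerA_le a _ i i2 hI
              show pvOuterA a b i2 (j+1) ans = pvGoB (a.drop i) (b.drop j) ans
              rw [ih i2 (j+1) ans (by omega)]
              rw [hd, hbd, pvGoB, if_neg (by omega), if_pos he.symm, ← hd, hdw]
          · -- b[j] < a[i]: both sides advance in b
            rw [if_neg he, ih i (j+1) ans (by omega)]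
            rw [hd, hbd, pvGoB, if_pos (by omega), ← hd]
      · -- b is exhausted: A copies a element by element, B copies the suffix at once
        rw [if_pos (Or.inl (by omega)), ih (i+1) j (ans ++ [a.getD i 0]) (by omega)]
        rw [List.drop_eq_nil_of_le (by omega : b.length ≤ j), pvGoB_nil_right, pvGoB_nil_right, hd]
        simp
    · rw [pvOuterA, if_neg hi, List.drop_eq_nil_of_le (by omega : a.length ≤ i), pvGoB]

-- ===== VERDICT (by name: the statement is the Claim_ definition above) =====
theorem filter_list_by_list_spec : Claim_equal_filter_list_by_list := by
  intro a b _hdom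
  unfold Spec_filter_list_by_list filter_list_by_list filter_list_by_list_alt
  simpa using pvOuterA_eq_pvGoB a b (a.length + b.length) 0 0 [] (by omega)
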